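-- pv_equiv track=rewrite | github.com/hehehex/hhhhhe | delete.py | findrel
-- ===== SOURCE A (Python) =====
-- def findrel(set,time,rel):
--     temrel = []
--     delrel = []
--     if time in set.keys():
--         for i in set[time]:
--             v, k = [], []
--             for r in rel:
--                 if r['o'] == i[1]:
--                     v.append(r['t'])
--                     delrel.append(r)
--                 if r['t'] == i[1]:
--                     k.append(r['o'])
--                     delrel.append(r)
--             for dr in delrel:
--                 if dr in rel:
--                     rel.remove(dr)
--             for j in k:
--                 for z in v:
--                     dic = {}
--                     dic['o']=j
--                     dic['t']=z
--                     temrel.append(dic)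
--         finrel = rel+temrel
--         return finrel
-- ===== SOURCE B (Python) =====
-- # Same task as A, different algorithm: index the relations by their 'o' and 't' values once,
-- # then contract each node by direct dictionary lookup instead of rescanning the whole
-- # relation list (and the accumulated delete-list) for every node.
-- # Note: A mutates `rel` in place (removes matched relations); B leaves it untouched --
-- # the equivalence proved is about the return value only.
-- def findrel(set, time, rel):
--     if time not in set:
--         return None
--     by_o = {}
--     by_t = {}
--     for idx, r in enumerate(rel):
--         by_o.setdefault(r['o'], []).append(idx)
--         by_t.setdefault(r['t'], []).append(idx)
--     dead = {}  # indices of removed relations ({} used as a set: `set` is shadowed)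
--     temrel = []
--     for i in set[time]:
--         x = i[1]
--         v = [rel[idx]['t'] for idx in by_o.get(x, []) if idx not in dead]
--         k = [rel[idx]['o'] for idx in by_t.get(x, []) if idx not in dead]
--         for idx in by_o.get(x, []):
--             dead[idx] = True
--         for idx in by_t.get(x, []):
--             dead[idx] = True
--         temrel += [{'o': j, 't': z} for j in k for z in v]
--     return [r for idx, r in enumerate(rel) if idx not in dead] + temrel
-- ===== Notes on version B (the rewrite author's own statement) =====
-- stated objective: alternative
-- what changed: B builds two dictionaries indexing the relations by their 'o'/'t' endpoint plus a dead-index set once, so each contracted node fetches and retires its incident relations by direct lookup, instead of A's per-node rescan of the whole relation list and of its ever-growing delete-list with repeated membership/list.remove passes; on match-sparse inputs the cost is comparable.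
-- outside the precondition, e.g. on findrel({1: [[5]]}, 1, []): A returns [], B raises IndexError; on findrel({1: []}, 1, [{'x': 0}]): A returns [{'x': 0}], B raises KeyError
import Mathlib
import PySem

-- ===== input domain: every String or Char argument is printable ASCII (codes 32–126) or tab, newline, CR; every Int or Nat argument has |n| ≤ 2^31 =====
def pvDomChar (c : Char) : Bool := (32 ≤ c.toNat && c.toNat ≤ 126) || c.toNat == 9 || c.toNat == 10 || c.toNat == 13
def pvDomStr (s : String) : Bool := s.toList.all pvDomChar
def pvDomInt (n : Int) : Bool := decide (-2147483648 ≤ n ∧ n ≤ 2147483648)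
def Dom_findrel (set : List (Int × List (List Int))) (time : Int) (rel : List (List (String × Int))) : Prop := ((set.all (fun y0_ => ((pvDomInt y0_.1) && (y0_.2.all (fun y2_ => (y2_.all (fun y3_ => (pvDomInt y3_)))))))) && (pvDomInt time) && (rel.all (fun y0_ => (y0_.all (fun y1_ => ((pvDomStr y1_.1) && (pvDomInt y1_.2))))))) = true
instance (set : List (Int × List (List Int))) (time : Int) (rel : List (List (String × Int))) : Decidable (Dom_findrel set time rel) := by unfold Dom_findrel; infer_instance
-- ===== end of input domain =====

-- B replaces A's per-node rescan of the whole relation list (and of the ever-growing delete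
-- list) by two dictionaries indexing the relations by their 'o' / 't' value plus a dead-index
-- set, looking the matching relations up directly.  A mutates `rel` in place (removes matched
-- relations), B does not: the equivalence proved is about the return value only.

-- shared primitive helpers: both Pythons read r['o'], r['t'] (first-match association-list
-- lookup = Python dict lookup under Pre_'s no-duplicate-keys condition) and look up set[time]
def pvLookup (d : List (Int × List (List Int))) (k : Int) : Option (List (List Int)) :=
  (d.find? (fun kv => kv.1 == k)).map (·.2)
def pvGetK (r : List (String × Int)) (key : String) : Option Int :=
  (r.find? (fun kv => kv.1 == key)).map (·.2)
-- r['o'] / r['t']: exact under Pre_ (which guarantees the key is present wherever A reads it)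
def pvO (r : List (String × Int)) : Int := (pvGetK r "o").getD 0
def pvT (r : List (String × Int)) : Int := (pvGetK r "t").getD 0

-- ===== PORT A =====
-- Python dict equality (dr == element of rel): same keys, same values
def pvDictEq (a b : List (String × Int)) : Bool :=
  a.all (fun kv => pvGetK b kv.1 == some kv.2) && b.all (fun kv => pvGetK a kv.1 == some kv.2)
-- rel.remove(dr): drop the first element == dr
def pvRemove (xs : List (List (String × Int))) (d : List (String × Int)) :
    List (List (String × Int)) :=
  match xs with
  | [] => []
  | y :: ys => if pvDictEq y d then ys else y :: pvRemove ys d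
-- dr in rel
def pvMemD (xs : List (List (String × Int))) (d : List (String × Int)) : Bool :=
  xs.any (fun y => pvDictEq y d)

-- the body of A's inner 'for r in rel' scan (state = (v, k, delrel))
def scanBody (x : Int) (a : List Int × List Int × List (List (String × Int)))
    (r : List (String × Int)) : List Int × List Int × List (List (String × Int)) :=
  let a := if pvO r == x then (a.1 ++ [pvT r], a.2.1, a.2.2 ++ [r]) else a
  if pvT r == x then (a.1, a.2.1 ++ [pvO r], a.2.2 ++ [r]) else a

-- the body of A's 'for i in set[time]' loop; state = (rel, temrel, delrel)
def bodyA (st : List (List (String × Int)) × List (List (String × Int)) × List (List (String × Int)))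
    (i : List Int) :
    List (List (String × Int)) × List (List (String × Int)) × List (List (String × Int)) :=
  let scan := st.1.foldl (scanBody (PySem.List.pyGetD i 1 0)) ([], [], st.2.2)
  -- scan = (v, k, delrel);  i[1] = pyGetD i 1 0, exact under Pre_ (i has ≥ 2 elements)
  let rel2 := scan.2.2.foldl (fun rel dr => if pvMemD rel dr then pvRemove rel dr else rel) st.1
  let tem2 := scan.2.1.foldl (fun acc j => acc ++ scan.1.map (fun z => [("o", j), ("t", z)])) st.2.1
  (rel2, tem2, scan.2.2)

def findrel (set : List (Int × List (List Int))) (time : Int) (rel : List (List (String × Int))) : Option (List (List (String × Int))) :=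
  match pvLookup set time with
  | none => none          -- 'if time in set.keys()' fails: A falls through and returns None
  | some L =>
    let s := L.foldl bodyA (rel, [], [])
    some (s.1 ++ s.2.1)

-- ===== PORT B =====
-- for idx, r in enumerate(rel): by_o.setdefault(r['o'],[]).append(idx); by_t likewise
def pvBuildIdx (rel : List (List (String × Int))) :
    PySem.Dict Int (List Int) × PySem.Dict Int (List Int) :=
  (PySem.List.enumerate rel).foldl
    (fun (d : PySem.Dict Int (List Int) × PySem.Dict Int (List Int)) p =>
      (d.1.modify (pvO p.2) [] (· ++ [p.1]), d.2.modify (pvT p.2) [] (· ++ [p.1])))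
    (PySem.Dict.empty, PySem.Dict.empty)

-- the body of B's 'for i in set[time]' loop; state = (dead, temrel)
def bodyB (rel : List (List (String × Int)))
    (bys : PySem.Dict Int (List Int) × PySem.Dict Int (List Int))
    (st : PySem.Dict Int Bool × List (List (String × Int))) (i : List Int) :
    PySem.Dict Int Bool × List (List (String × Int)) :=
  let x := PySem.List.pyGetD i 1 0
  let v := ((bys.1.getD x []).filter (fun idx => !st.1.contains idx)).map
             (fun idx => pvT (PySem.List.pyGetD rel idx []))
  let k := ((bys.2.getD x []).filter (fun idx => !st.1.contains idx)).map
             (fun idx => pvO (PySem.List.pyGetD rel idx []))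
  let d1 := (bys.1.getD x []).foldl (fun d idx => d.insert idx true) st.1
  let d2 := (bys.2.getD x []).foldl (fun d idx => d.insert idx true) d1
  (d2, st.2 ++ k.flatMap (fun j => v.map (fun z => [("o", j), ("t", z)])))

def findrel_alt (set : List (Int × List (List Int))) (time : Int) (rel : List (List (String × Int))) : Option (List (List (String × Int))) :=
  match pvLookup set time with
  | none => none
  | some L =>
    let bys := pvBuildIdx rel
    let s := L.foldl (bodyB rel bys) (PySem.Dict.empty, [])
    some (((PySem.List.enumerate rel).filter (fun p => !s.1.contains p.1)).map (·.2) ++ s.2)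

-- ===== PRECONDITION & SPEC =====
-- Pre_ excludes (a) inputs where Python A raises (a relation without an 'o'/'t' key, or a
-- node entry i with fewer than 2 elements, reached while the loops run); (b) inputs where A
-- returns only because its laziness skips an access B's natural form performs (empty rel
-- with a short node entry, or relations missing 'o'/'t' when set[time] is empty), where B
-- raises; (c) association lists with duplicate keys, whose Python dict value (last
-- occurrence wins) differs from the first-match association-list reading — a representation
-- ambiguity of the dict-as-list convention.
def Pre_findrel (set : List (Int × List (List Int))) (time : Int) (rel : List (List (String × Int))) : Prop :=
  (set.map Prod.fst).Nodup ∧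
  (∀ r ∈ rel, (r.map Prod.fst).Nodup) ∧
  (∀ L ∈ pvLookup set time,
     (∀ r ∈ rel, (pvGetK r "o").isSome ∧ (pvGetK r "t").isSome) ∧
     (L = [] ∨ ∀ i ∈ L, 2 ≤ i.length))
instance (set : List (Int × List (List Int))) (time : Int) (rel : List (List (String × Int))) : Decidable (Pre_findrel set time rel) := by unfold Pre_findrel; infer_instance
def pvWitness_findrel : (List (Int × List (List Int))) × Int × (List (List (String × Int))) :=
  ([(1, [[0, 5], [0, 2]])], 1, [[("o", 5), ("t", 7)], [("o", 2), ("t", 5)], [("o", 9), ("t", 2)]])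
def Spec_findrel (set : List (Int × List (List Int))) (time : Int) (rel : List (List (String × Int))) (out : Option (List (List (String × Int)))) : Prop := out = findrel_alt set time rel
instance (set : List (Int × List (List Int))) (time : Int) (rel : List (List (String × Int))) (out : Option (List (List (String × Int)))) : Decidable (Spec_findrel set time rel out) := by unfold Spec_findrel; infer_instance

-- ===== CLAIM (what is proved, stated in full; the proofs are below) =====
def Claim_equal_findrel : Prop := ∀ (set : List (Int × List (List Int))) (time : Int) (rel : List (List (String × Int))), Dom_findrel set time rel → Pre_findrel set time rel → Spec_findrel set time rel (findrel set time rel)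

-- ===== LEMMAS AND PROOFS =====

-- the common mathematical content of one loop iteration: contract node x
def pvP (x : Int) (r : List (String × Int)) : Bool := pvO r == x || pvT r == x
def pvV (x : Int) (rel : List (List (String × Int))) : List Int :=
  (rel.filter (fun r => pvO r == x)).map pvT
def pvK (x : Int) (rel : List (List (String × Int))) : List Int :=
  (rel.filter (fun r => pvT r == x)).map pvO
def pvM (x : Int) (rel : List (List (String × Int))) : List (List (String × Int)) :=
  rel.flatMap (fun r => (if pvO r == x then [r] else []) ++ (if pvT r == x then [r] else []))
def pvStep (st : List (List (String × Int)) × List (List (String × Int))) (i : List Int) :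
    List (List (String × Int)) × List (List (String × Int)) :=
  let x := PySem.List.pyGetD i 1 0
  (st.1.filter (fun r => !pvP x r),
   st.2 ++ (pvK x st.1).flatMap (fun j => (pvV x st.1).map (fun z => [("o", j), ("t", z)])))

-- ---------- Python dict equality ----------

theorem pvGetK_mem {r : List (String × Int)} {key : String} {v : Int}
    (h : pvGetK r key = some v) : (key, v) ∈ r := by
  unfold pvGetK at h
  obtain ⟨kv, hf, hkv⟩ := Option.map_eq_some_iff.mp h
  have hm := List.mem_of_find?_eq_some hf
  have hp := List.find?_some hf
  have : kv.1 = key := by simpa using hp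
  cases kv; simp_all

theorem pvGetK_none {r : List (String × Int)} {key : String}
    (h : pvGetK r key = none) : ∀ v, (key, v) ∉ r := by
  intro v hv
  unfold pvGetK at h
  rw [Option.map_eq_none_iff] at h
  have := List.find?_eq_none.mp h _ hv
  simp at this

theorem pvDictEq_get {a b : List (String × Int)} (h : pvDictEq a b = true) (key : String) :
    pvGetK a key = pvGetK b key := by
  unfold pvDictEq at h
  obtain ⟨h1, h2⟩ := Bool.and_eq_true_iff.mp h
  rw [List.all_eq_true] at h1 h2
  cases ha : pvGetK a key with
  | some v =>
    have := h1 _ (pvGetK_mem ha)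
    simp only [beq_iff_eq] at this
    rw [this]
  | none =>
    cases hb : pvGetK b key with
    | none => rfl
    | some w =>
      have := h2 _ (pvGetK_mem hb)
      simp only [beq_iff_eq] at this
      exact absurd (pvGetK_mem this) (by intro hmem; exact pvGetK_none ha w hmem)

theorem pvGetK_self_of_nodup {r : List (String × Int)} (h : (r.map Prod.fst).Nodup) :
    ∀ kv ∈ r, pvGetK r kv.1 = some kv.2 := by
  induction r with
  | nil => simp
  | cons p t ih =>
    intro kv hkv
    simp only [List.map_cons, List.nodup_cons] at h
    rcases List.mem_cons.mp hkv with h1 | h1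
    · subst h1; simp [pvGetK, List.find?_cons_of_pos]
    · have hne : (p.1 == kv.1) = false := by
        simp only [beq_eq_false_iff_ne, ne_eq]
        intro he
        exact h.1 (he ▸ List.mem_map_of_mem h1)
      have hrec := ih h.2 kv h1
      unfold pvGetK at hrec ⊢
      rw [List.find?_cons_of_neg (by simp [hne])]
      exact hrec

theorem pvDictEq_refl {a : List (String × Int)} (h : (a.map Prod.fst).Nodup) :
    pvDictEq a a = true := by
  unfold pvDictEq
  have hall : a.all (fun kv => pvGetK a kv.1 == some kv.2) = true := by
    rw [List.all_eq_true]; intro kv hkv; simp [pvGetK_self_of_nodup h kv hkv]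
  rw [Bool.and_eq_true_iff]
  exact ⟨hall, hall⟩

theorem pvDictEq_symm (a b : List (String × Int)) : pvDictEq a b = pvDictEq b a := by
  unfold pvDictEq; rw [Bool.and_comm]

theorem pvDictEq_trans {a b c : List (String × Int)} (hab : pvDictEq a b = true)
    (hbc : pvDictEq b c = true) : pvDictEq a c = true := by
  have hbcg := pvDictEq_get hbc
  have habg := pvDictEq_get hab
  unfold pvDictEq at hab hbc ⊢
  obtain ⟨hab1, _⟩ := Bool.and_eq_true_iff.mp hab
  obtain ⟨_, hbc2⟩ := Bool.and_eq_true_iff.mp hbc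
  rw [List.all_eq_true] at hab1 hbc2
  rw [Bool.and_eq_true_iff]
  constructor <;> rw [List.all_eq_true]
  · intro kv hkv
    have := hab1 _ hkv
    simp only [beq_iff_eq] at this ⊢
    rw [← hbcg kv.1]; exact this
  · intro kv hkv
    have := hbc2 _ hkv
    simp only [beq_iff_eq] at this ⊢
    rw [habg kv.1]; exact this

theorem pvO_congr {a b : List (String × Int)} (h : pvDictEq a b = true) : pvO a = pvO b := by
  unfold pvO; rw [pvDictEq_get h]

theorem pvT_congr {a b : List (String × Int)} (h : pvDictEq a b = true) : pvT a = pvT b := by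
  unfold pvT; rw [pvDictEq_get h]

theorem pvP_congr {x : Int} {a b : List (String × Int)} (h : pvDictEq a b = true) :
    pvP x a = pvP x b := by
  unfold pvP; rw [pvO_congr h, pvT_congr h]

-- ---------- the remove loop is a filter ----------

def pvCountD (ds : List (List (String × Int))) (r : List (String × Int)) : Nat :=
  ds.countP (fun d => pvDictEq d r)

def pvFoldRemove (xs ds : List (List (String × Int))) : List (List (String × Int)) :=
  ds.foldl (fun rel dr => if pvMemD rel dr then pvRemove rel dr else rel) xs

theorem mem_of_mem_pvRemove {xs : List (List (String × Int))} {d y : List (String × Int)}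
    (h : y ∈ pvRemove xs d) : y ∈ xs := by
  induction xs with
  | nil => simpa [pvRemove] using h
  | cons a t ih =>
    by_cases hd : pvDictEq a d = true
    · simp only [pvRemove, if_pos hd] at h; exact List.mem_cons_of_mem _ h
    · simp only [pvRemove, if_neg hd, List.mem_cons] at h
      rcases h with h | h
      · exact h ▸ List.mem_cons_self
      · exact List.mem_cons_of_mem _ (ih h)

theorem pvCountD_remove {xs : List (List (String × Int))} {d : List (String × Int)}
    (h : pvMemD xs d = true) (r : List (String × Int)) :
    pvCountD xs r = pvCountD (pvRemove xs d) r + (if pvDictEq d r then 1 else 0) := by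
  induction xs with
  | nil => simp [pvMemD] at h
  | cons a t ih =>
    by_cases hd : pvDictEq a d = true
    · have har : pvDictEq a r = pvDictEq d r := by
        cases hdr : pvDictEq d r
        · cases har2 : pvDictEq a r
          · rfl
          · exact absurd (pvDictEq_trans ((pvDictEq_symm a d) ▸ hd : pvDictEq d a = true) har2)
              (by simp [hdr])
        · exact pvDictEq_trans hd hdr
      simp [pvRemove, if_pos hd, pvCountD, List.countP_cons, har]
    · have ht : pvMemD t d = true := by
        simp only [pvMemD, List.any_cons, Bool.or_eq_true] at h
        rcases h with h | h
        · exact absurd h hd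
        · exact h
      have := ih ht
      simp only [pvRemove, if_neg hd, pvCountD, List.countP_cons] at this ⊢
      omega

theorem filter_pvRemove {x : Int} {xs : List (List (String × Int))} {d : List (String × Int)}
    (hPd : pvP x d = true) :
    (pvRemove xs d).filter (fun r => !pvP x r) = xs.filter (fun r => !pvP x r) := by
  induction xs with
  | nil => simp [pvRemove]
  | cons a t ih =>
    by_cases hd : pvDictEq a d = true
    · have : pvP x a = true := (pvP_congr hd) ▸ hPd
      simp [pvRemove, if_pos hd, List.filter_cons, this]
    · simp only [pvRemove, if_neg hd, List.filter_cons]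
      rw [ih]

theorem pvCountD_pos_of_mem {xs : List (List (String × Int))} {r : List (String × Int)}
    (hr : r ∈ xs) (hn : (r.map Prod.fst).Nodup) : 1 ≤ pvCountD xs r := by
  have h0 : 0 < xs.countP (fun d => pvDictEq d r) :=
    List.countP_pos_iff.mpr ⟨r, hr, pvDictEq_refl hn⟩
  simpa [pvCountD] using h0

theorem pvFoldRemove_eq_filter (x : Int) : ∀ (ds xs : List (List (String × Int))),
    (∀ d ∈ ds, pvP x d = true) →
    (∀ r ∈ xs, pvP x r = true → pvCountD xs r ≤ pvCountD ds r) →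
    (∀ r ∈ xs, (r.map Prod.fst).Nodup) →
    pvFoldRemove xs ds = xs.filter (fun r => !pvP x r) := by
  intro ds
  induction ds with
  | nil =>
    intro xs _ hc hn
    have hall : ∀ r ∈ xs, (!pvP x r) = true := by
      intro r hr
      cases hp : pvP x r
      · simp
      · have h1 := pvCountD_pos_of_mem hr (hn r hr)
        have h2 := hc r hr hp
        have h0 : pvCountD [] r = 0 := by simp [pvCountD]
        omega
    simp only [pvFoldRemove, List.foldl_nil]
    exact (List.filter_eq_self.mpr hall).symm
  | cons d ds ih =>
    intro xs hP hc hn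
    have hPd : pvP x d = true := hP d List.mem_cons_self
    by_cases hm : pvMemD xs d = true
    · have hstep : pvFoldRemove xs (d :: ds) = pvFoldRemove (pvRemove xs d) ds := by
        simp [pvFoldRemove, hm]
      rw [hstep, ih (pvRemove xs d)
        (fun e he => hP e (List.mem_cons_of_mem _ he))
        (fun r hr hp => by
          have hrx : r ∈ xs := mem_of_mem_pvRemove hr
          have h1 := pvCountD_remove hm r
          have h2 : pvCountD (d :: ds) r = pvCountD ds r + (if pvDictEq d r then 1 else 0) := by
            simp [pvCountD, List.countP_cons]
          have h3 := hc r hrx hp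
          rw [h2] at h3
          omega)
        (fun r hr => hn r (mem_of_mem_pvRemove hr))]
      exact filter_pvRemove hPd
    · have hstep : pvFoldRemove xs (d :: ds) = pvFoldRemove xs ds := by
        simp only [pvFoldRemove, List.foldl_cons, if_neg hm]
      rw [hstep]
      refine ih xs (fun e he => hP e (List.mem_cons_of_mem _ he)) ?_ hn
      intro r hr hp
      have hdr : pvDictEq d r = false := by
        cases hdr : pvDictEq d r
        · rfl
        · exfalso
          have : pvMemD xs d = true := by
            simp only [pvMemD, List.any_eq_true]
            exact ⟨r, hr, (pvDictEq_symm d r) ▸ hdr⟩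
          simp [this] at hm
      have h2 : pvCountD (d :: ds) r = pvCountD ds r := by
        simp [pvCountD, List.countP_cons, hdr]
      have := hc r hr hp
      omega

theorem mem_pvM {x : Int} {rel : List (List (String × Int))} {d : List (String × Int)}
    (h : d ∈ pvM x rel) : d ∈ rel ∧ pvP x d = true := by
  unfold pvM at h
  obtain ⟨r, hr, hd⟩ := List.mem_flatMap.mp h
  rw [List.mem_append] at hd
  rcases hd with hd | hd <;>
  · split at hd <;> simp_all [pvP]

theorem pvCountD_le_pvM {x : Int} {r : List (String × Int)} (hP : pvP x r = true) :
    ∀ rel : List (List (String × Int)), pvCountD rel r ≤ pvCountD (pvM x rel) r := by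
  intro rel
  induction rel with
  | nil => simp [pvCountD, pvM]
  | cons e t ih =>
    have hM : pvM x (e :: t) =
        ((if pvO e == x then [e] else []) ++ (if pvT e == x then [e] else [])) ++ pvM x t := by
      simp [pvM]
    rw [hM]
    have h2 : pvCountD (((if pvO e == x then [e] else []) ++
          (if pvT e == x then [e] else [])) ++ pvM x t) r
        = pvCountD (if pvO e == x then [e] else []) r
          + pvCountD (if pvT e == x then [e] else []) r + pvCountD (pvM x t) r := by
      simp only [pvCountD, List.countP_append]
    cases her : pvDictEq e r
    · have h1 : pvCountD (e :: t) r = pvCountD t r := by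
        simp [pvCountD, List.countP_cons, her]
      omega
    · have h1 : pvCountD (e :: t) r = pvCountD t r + 1 := by
        simp [pvCountD, List.countP_cons, her]
      have hPe : (pvO e == x) = true ∨ (pvT e == x) = true := by
        have hcongr := pvP_congr (x := x) her
        have hPee : pvP x e = true := hcongr ▸ hP
        exact Bool.or_eq_true_iff.mp (by simpa [pvP] using hPee)
      have hone : 1 ≤ pvCountD (if pvO e == x then [e] else []) r
          + pvCountD (if pvT e == x then [e] else []) r := by
        rcases hPe with ho | ho
        · have hx1 : pvCountD (if pvO e == x then [e] else []) r = 1 := by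
            rw [ho]; simp [pvCountD, her]
          omega
        · have hx1 : pvCountD (if pvT e == x then [e] else []) r = 1 := by
            rw [ho]; simp [pvCountD, her]
          omega
      omega

theorem pvFoldRemove_id {xs ds : List (List (String × Int))}
    (h : ∀ d ∈ ds, pvMemD xs d = false) : pvFoldRemove xs ds = xs := by
  induction ds with
  | nil => rfl
  | cons d t ih =>
    have h1 : pvMemD xs d = false := h d List.mem_cons_self
    simp only [pvFoldRemove, List.foldl_cons, h1, if_neg, Bool.false_eq_true,
      not_false_eq_true]
    exact ih (fun e he => h e (List.mem_cons_of_mem _ he))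

-- ---------- A's scan loop ----------

theorem scanBody_eq (x : Int) (v0 k0 : List Int) (d0 : List (List (String × Int)))
    (r : List (String × Int)) :
    scanBody x (v0, k0, d0) r
      = (v0 ++ (if pvO r == x then [pvT r] else []),
         k0 ++ (if pvT r == x then [pvO r] else []),
         d0 ++ ((if pvO r == x then [r] else []) ++ (if pvT r == x then [r] else []))) := by
  by_cases ho : (pvO r == x) = true <;> by_cases ht : (pvT r == x) = true <;>
    simp [scanBody, ho, ht, List.append_assoc]

theorem scanA (x : Int) : ∀ (rel : List (List (String × Int)))
    (v0 k0 : List Int) (d0 : List (List (String × Int))),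
    rel.foldl (scanBody x) (v0, k0, d0)
    = (v0 ++ pvV x rel, k0 ++ pvK x rel, d0 ++ pvM x rel) := by
  intro rel
  induction rel with
  | nil => simp [pvV, pvK, pvM]
  | cons r t ih =>
    intro v0 k0 d0
    rw [List.foldl_cons, scanBody_eq, ih]
    refine congrArg₂ Prod.mk ?_ (congrArg₂ Prod.mk ?_ ?_)
    · by_cases ho : (pvO r == x) = true <;>
        simp [pvV, List.filter_cons, ho, List.append_assoc]
    · by_cases ht : (pvT r == x) = true <;>
        simp [pvK, List.filter_cons, ht, List.append_assoc]
    · simp [pvM, List.append_assoc]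

-- ---------- A equals the model ----------

def pvInvA (xs ds : List (List (String × Int))) : Prop :=
  (∀ r ∈ xs, (r.map Prod.fst).Nodup) ∧ (∀ d ∈ ds, pvMemD xs d = false)

theorem bodyA_eq {xs tem ds : List (List (String × Int))} {i : List Int}
    (h : pvInvA xs ds) :
    bodyA (xs, tem, ds) i = ((pvStep (xs, tem) i).1, (pvStep (xs, tem) i).2,
      ds ++ pvM (PySem.List.pyGetD i 1 0) xs) ∧
    pvInvA (pvStep (xs, tem) i).1 (ds ++ pvM (PySem.List.pyGetD i 1 0) xs) := by
  obtain ⟨hn, hd⟩ := h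
  have hrel2 : List.foldl (fun rel dr => if pvMemD rel dr then pvRemove rel dr else rel) xs
      (ds ++ pvM (PySem.List.pyGetD i 1 0) xs)
      = xs.filter (fun r => !pvP (PySem.List.pyGetD i 1 0) r) := by
    show pvFoldRemove xs (ds ++ pvM (PySem.List.pyGetD i 1 0) xs) = _
    rw [pvFoldRemove, List.foldl_append]
    rw [show List.foldl (fun rel dr => if pvMemD rel dr then pvRemove rel dr else rel) xs ds
        = pvFoldRemove xs ds from rfl, pvFoldRemove_id hd]
    exact pvFoldRemove_eq_filter _ _ _
      (fun d hdm => (mem_pvM hdm).2)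
      (fun r hr hp => pvCountD_le_pvM hp xs)
      hn
  constructor
  · simp only [bodyA, pvStep, scanA, List.nil_append]
    rw [hrel2, PySem.List.foldl_append_eq_flatMap]
  · constructor
    · intro r hr
      have hr' : r ∈ xs ∧ pvP (PySem.List.pyGetD i 1 0) r = false := by
        simpa [pvStep] using hr
      exact hn r hr'.1
    · intro d hdm
      rw [List.mem_append] at hdm
      simp only [pvMemD, List.any_eq_false]
      intro y hy
      have hy' : y ∈ xs ∧ pvP (PySem.List.pyGetD i 1 0) y = false := by
        simpa [pvStep] using hy
      rcases hdm with hold | hnew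
      · have hf := hd d hold
        simp only [pvMemD, List.any_eq_false] at hf
        exact hf y hy'.1
      · obtain ⟨hdrel, hPd⟩ := mem_pvM hnew
        cases hq : pvDictEq y d
        · simp
        · exact absurd ((pvP_congr hq).trans hPd) (by simp [hy'.2])

theorem foldA : ∀ (L : List (List Int))
    (xs tem ds : List (List (String × Int))), pvInvA xs ds →
    ∃ ds', L.foldl bodyA (xs, tem, ds) =
      ((L.foldl pvStep (xs, tem)).1, (L.foldl pvStep (xs, tem)).2, ds') := by
  intro L
  induction L with
  | nil => intro xs tem ds _; exact ⟨ds, rfl⟩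
  | cons i t ih =>
    intro xs tem ds h
    obtain ⟨he, hinv⟩ := bodyA_eq (i := i) (tem := tem) h
    rw [List.foldl_cons, List.foldl_cons, he]
    have := ih (pvStep (xs, tem) i).1 (pvStep (xs, tem) i).2
      (ds ++ pvM (PySem.List.pyGetD i 1 0) xs) hinv
    simpa using this

-- ---------- B equals the model ----------

theorem pvEnum_cons {α : Type} (a : α) (t : List α) (s : Int) :
    PySem.List.enumerate (a :: t) s = (s, a) :: PySem.List.enumerate t (s + 1) := rfl

theorem pvEnum_snd {α : Type} : ∀ (t : List α) (s : Int),
    (PySem.List.enumerate t s).map (·.2) = t := by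
  intro t
  induction t with
  | nil => intro s; rfl
  | cons a t ih => intro s; rw [pvEnum_cons, List.map_cons, ih]

theorem pvEnum_mem {α : Type} : ∀ (t : List α) (s : Int) (d0 : α) (p : Int × α),
    p ∈ PySem.List.enumerate t s →
    s ≤ p.1 ∧ p.1 < s + t.length ∧ PySem.List.pyGetD t (p.1 - s) d0 = p.2 := by
  intro t
  induction t with
  | nil => intro s d0 p hp; simp [PySem.List.enumerate] at hp
  | cons a t ih =>
    intro s d0 p hp
    rw [pvEnum_cons, List.mem_cons] at hp
    rcases hp with hp | hp
    · subst hp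
      refine ⟨le_refl _, by simp only [List.length_cons]; push_cast; omega, ?_⟩
      simp [PySem.List.pyGetD_zero_cons]
    · obtain ⟨h1, h2, h3⟩ := ih (s + 1) d0 p hp
      refine ⟨by omega, by simp only [List.length_cons] at h2 ⊢; push_cast at h2 ⊢; omega, ?_⟩
      have e1 : p.1 - s = (((p.1 - (s + 1)).toNat + 1 : Nat) : Int) := by omega
      have e2 : p.1 - (s + 1) = (((p.1 - (s + 1)).toNat : Nat) : Int) := by omega
      rw [e2, PySem.List.pyGetD_natCast] at h3
      rw [e1, PySem.List.pyGetD_natCast, List.getD_cons_succ]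
      exact h3

theorem pvEnum_inj {α : Type} {t : List α} {s : Int} {p q : Int × α} (d0 : α)
    (hp : p ∈ PySem.List.enumerate t s) (hq : q ∈ PySem.List.enumerate t s)
    (h : p.1 = q.1) : p = q := by
  obtain ⟨_, _, h3⟩ := pvEnum_mem t s d0 p hp
  obtain ⟨_, _, h3'⟩ := pvEnum_mem t s d0 q hq
  have : p.2 = q.2 := by rw [← h3, ← h3', h]
  exact Prod.ext h this

-- the one fold over enumerate(rel) building both dicts is the two separate folds
theorem pvFoldPair : ∀ (l : List (Int × List (String × Int)))
    (d1 d2 : PySem.Dict Int (List Int)),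
    l.foldl (fun (d : PySem.Dict Int (List Int) × PySem.Dict Int (List Int)) p =>
      (d.1.modify (pvO p.2) [] (· ++ [p.1]), d.2.modify (pvT p.2) [] (· ++ [p.1]))) (d1, d2)
    = (l.foldl (fun d p => d.modify (pvO p.2) [] (· ++ [p.1])) d1,
       l.foldl (fun d p => d.modify (pvT p.2) [] (· ++ [p.1])) d2) := by
  intro l
  induction l with
  | nil => intro d1 d2; rfl
  | cons a t ih =>
    intro d1 d2
    rw [List.foldl_cons, List.foldl_cons, List.foldl_cons]
    exact ih _ _

theorem pvBuildIdx_fst (rel : List (List (String × Int))) (c : Int) :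
    (pvBuildIdx rel).1.getD c []
      = ((PySem.List.enumerate rel 0).filter (fun p => pvO p.2 == c)).map (·.1) := by
  unfold pvBuildIdx
  rw [pvFoldPair]
  have hstep : ((PySem.List.enumerate rel 0).map (fun p => (pvO p.2, p.1))).foldl
      (fun d q => PySem.Dict.modify d q.1 [] (· ++ [q.2])) PySem.Dict.empty
      = (PySem.List.enumerate rel 0).foldl
        (fun d p => PySem.Dict.modify d (pvO p.2) [] (· ++ [p.1])) PySem.Dict.empty := by
    rw [List.foldl_map]
  rw [← hstep, PySem.Dict.getD_foldl_modify_append]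
  rw [PySem.Dict.getD_empty, List.filter_map, List.map_map, List.nil_append]
  rw [show List.filter ((fun (q : Int × Int) => q.1 == c) ∘ fun p => (pvO p.2, p.1))
      (PySem.List.enumerate rel 0)
      = List.filter (fun p => pvO p.2 == c) (PySem.List.enumerate rel 0) from
    List.filter_congr (fun p _ => rfl)]
  exact List.map_congr_left (fun p _ => rfl)

theorem pvBuildIdx_snd (rel : List (List (String × Int))) (c : Int) :
    (pvBuildIdx rel).2.getD c []
      = ((PySem.List.enumerate rel 0).filter (fun p => pvT p.2 == c)).map (·.1) := by
  unfold pvBuildIdx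
  rw [pvFoldPair]
  have hstep : ((PySem.List.enumerate rel 0).map (fun p => (pvT p.2, p.1))).foldl
      (fun d q => PySem.Dict.modify d q.1 [] (· ++ [q.2])) PySem.Dict.empty
      = (PySem.List.enumerate rel 0).foldl
        (fun d p => PySem.Dict.modify d (pvT p.2) [] (· ++ [p.1])) PySem.Dict.empty := by
    rw [List.foldl_map]
  rw [← hstep, PySem.Dict.getD_foldl_modify_append]
  rw [PySem.Dict.getD_empty, List.filter_map, List.map_map, List.nil_append]
  rw [show List.filter ((fun (q : Int × Int) => q.1 == c) ∘ fun p => (pvT p.2, p.1))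
      (PySem.List.enumerate rel 0)
      = List.filter (fun p => pvT p.2 == c) (PySem.List.enumerate rel 0) from
    List.filter_congr (fun p _ => rfl)]
  exact List.map_congr_left (fun p _ => rfl)

theorem pvDeadFold (lst : List Int) : ∀ (d : PySem.Dict Int Bool) (i : Int),
    ((lst.foldl (fun d idx => d.insert idx true) d).contains i)
      = (d.contains i || lst.contains i) := by
  induction lst with
  | nil => intro d i; simp
  | cons a t ih =>
    intro d i
    rw [List.foldl_cons, ih, PySem.Dict.contains_insert, List.contains_cons]
    cases h1 : (i == a) <;> cases h2 : d.contains i <;> cases h3 : t.contains i <;>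
      simp [h1, h2, h3]

theorem pvIdxO_contains {rel : List (List (String × Int))} {p : Int × List (String × Int)}
    (hp : p ∈ PySem.List.enumerate rel 0) (c : Int) :
    ((pvBuildIdx rel).1.getD c []).contains p.1 = (pvO p.2 == c) := by
  rw [pvBuildIdx_fst]
  by_cases hmem : p.1 ∈ ((PySem.List.enumerate rel 0).filter (fun p => pvO p.2 == c)).map (·.1)
  · obtain ⟨q, hq, hq1⟩ := List.mem_map.mp hmem
    obtain ⟨hqe, hqA⟩ := List.mem_filter.mp hq
    have hqp : q = p := pvEnum_inj [] hqe hp hq1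
    have hA : (pvO p.2 == c) = true := by rw [← hqp]; exact hqA
    rw [hA]
    exact List.contains_iff_mem.mpr hmem
  · have hA : (pvO p.2 == c) = false := by
      cases hA : (pvO p.2 == c)
      · rfl
      · exact absurd (List.mem_map_of_mem (List.mem_filter.mpr ⟨hp, hA⟩)) hmem
    rw [hA]
    cases hcon : (((PySem.List.enumerate rel 0).filter
        (fun p => pvO p.2 == c)).map (·.1)).contains p.1
    · rfl
    · exact absurd (List.contains_iff_mem.mp hcon) hmem

theorem pvIdxT_contains {rel : List (List (String × Int))} {p : Int × List (String × Int)}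
    (hp : p ∈ PySem.List.enumerate rel 0) (c : Int) :
    ((pvBuildIdx rel).2.getD c []).contains p.1 = (pvT p.2 == c) := by
  rw [pvBuildIdx_snd]
  by_cases hmem : p.1 ∈ ((PySem.List.enumerate rel 0).filter (fun p => pvT p.2 == c)).map (·.1)
  · obtain ⟨q, hq, hq1⟩ := List.mem_map.mp hmem
    obtain ⟨hqe, hqA⟩ := List.mem_filter.mp hq
    have hqp : q = p := pvEnum_inj [] hqe hp hq1
    have hA : (pvT p.2 == c) = true := by rw [← hqp]; exact hqA
    rw [hA]
    exact List.contains_iff_mem.mpr hmem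
  · have hA : (pvT p.2 == c) = false := by
      cases hA : (pvT p.2 == c)
      · rfl
      · exact absurd (List.mem_map_of_mem (List.mem_filter.mpr ⟨hp, hA⟩)) hmem
    rw [hA]
    cases hcon : (((PySem.List.enumerate rel 0).filter
        (fun p => pvT p.2 == c)).map (·.1)).contains p.1
    · rfl
    · exact absurd (List.contains_iff_mem.mp hcon) hmem

def pvRelState (rel : List (List (String × Int))) (dead : PySem.Dict Int Bool)
    (alive : List (List (String × Int))) : Prop :=
  alive = ((PySem.List.enumerate rel 0).filter (fun p => !dead.contains p.1)).map (·.2)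

theorem pvV_master (x : Int) (dead : PySem.Dict Int Bool) (rel : List (List (String × Int))) :
    ∀ l : List (Int × List (String × Int)),
    (∀ p ∈ l, PySem.List.pyGetD rel p.1 [] = p.2) →
    (((l.filter (fun p => pvO p.2 == x)).map (·.1)).filter
        (fun idx => !dead.contains idx)).map (fun idx => pvT (PySem.List.pyGetD rel idx []))
      = pvV x ((l.filter (fun p => !dead.contains p.1)).map (·.2)) := by
  intro l
  induction l with
  | nil => intro _; simp [pvV]
  | cons p t ih =>
    intro hco
    have hp : PySem.List.pyGetD rel p.1 [] = p.2 := hco p List.mem_cons_self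
    have iht := ih (fun q hq => hco q (List.mem_cons_of_mem _ hq))
    cases hA : (pvO p.2 == x) <;> cases hB : dead.contains p.1 <;>
      simp [List.filter_cons, hA, hB, pvV, hp, iht]

theorem pvK_master (x : Int) (dead : PySem.Dict Int Bool) (rel : List (List (String × Int))) :
    ∀ l : List (Int × List (String × Int)),
    (∀ p ∈ l, PySem.List.pyGetD rel p.1 [] = p.2) →
    (((l.filter (fun p => pvT p.2 == x)).map (·.1)).filter
        (fun idx => !dead.contains idx)).map (fun idx => pvO (PySem.List.pyGetD rel idx []))
      = pvK x ((l.filter (fun p => !dead.contains p.1)).map (·.2)) := by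
  intro l
  induction l with
  | nil => intro _; simp [pvK]
  | cons p t ih =>
    intro hco
    have hp : PySem.List.pyGetD rel p.1 [] = p.2 := hco p List.mem_cons_self
    have iht := ih (fun q hq => hco q (List.mem_cons_of_mem _ hq))
    cases hA : (pvT p.2 == x) <;> cases hB : dead.contains p.1 <;>
      simp [List.filter_cons, hA, hB, pvK, hp, iht]

theorem pvAlive_master (x : Int) (dead d2 : PySem.Dict Int Bool) :
    ∀ l : List (Int × List (String × Int)),
    (∀ p ∈ l, d2.contains p.1 = (dead.contains p.1 || pvP x p.2)) →
    (l.filter (fun p => !d2.contains p.1)).map (·.2)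
      = ((l.filter (fun p => !dead.contains p.1)).map (·.2)).filter (fun r => !pvP x r) := by
  intro l
  induction l with
  | nil => intro _; simp
  | cons p t ih =>
    intro hch
    have hp := hch p List.mem_cons_self
    have iht := ih (fun q hq => hch q (List.mem_cons_of_mem _ hq))
    cases hB : dead.contains p.1 <;> cases hC : pvP x p.2 <;>
      rw [hB, hC] at hp <;>
      simp [List.filter_cons, hB, hC, hp, iht]

theorem pvCoherent (rel : List (List (String × Int))) :
    ∀ p ∈ PySem.List.enumerate rel 0, PySem.List.pyGetD rel p.1 [] = p.2 := by
  intro p hp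
  have := (pvEnum_mem rel 0 [] p hp).2.2
  simpa using this

theorem bodyB_eq {rel : List (List (String × Int))} {dead : PySem.Dict Int Bool}
    {alive tem : List (List (String × Int))} {i : List Int}
    (hrs : pvRelState rel dead alive) :
    (bodyB rel (pvBuildIdx rel) (dead, tem) i).2 = (pvStep (alive, tem) i).2 ∧
    pvRelState rel (bodyB rel (pvBuildIdx rel) (dead, tem) i).1 (pvStep (alive, tem) i).1 := by
  have hv := pvV_master (PySem.List.pyGetD i 1 0) dead rel _ (pvCoherent rel)
  have hk := pvK_master (PySem.List.pyGetD i 1 0) dead rel _ (pvCoherent rel)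
  have hchar : ∀ p ∈ PySem.List.enumerate rel 0,
      (((pvBuildIdx rel).2.getD (PySem.List.pyGetD i 1 0) []).foldl
        (fun d idx => d.insert idx true)
        (((pvBuildIdx rel).1.getD (PySem.List.pyGetD i 1 0) []).foldl
          (fun d idx => d.insert idx true) dead)).contains p.1
      = (dead.contains p.1 || pvP (PySem.List.pyGetD i 1 0) p.2) := by
    intro p hp
    rw [pvDeadFold, pvDeadFold, pvIdxO_contains hp, pvIdxT_contains hp]
    cases h1 : dead.contains p.1 <;>
      cases h2 : (pvO p.2 == PySem.List.pyGetD i 1 0) <;>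
      cases h3 : (pvT p.2 == PySem.List.pyGetD i 1 0) <;>
      simp [pvP, h1, h2, h3]
  unfold pvRelState at hrs
  constructor
  · simp only [bodyB, pvStep]
    rw [pvBuildIdx_fst, pvBuildIdx_snd, hv, hk, ← hrs]
  · simp only [bodyB, pvStep]
    unfold pvRelState
    rw [hrs]
    exact (pvAlive_master (PySem.List.pyGetD i 1 0) dead _ _ hchar).symm

theorem foldB (rel : List (List (String × Int))) : ∀ (L : List (List Int))
    (dead : PySem.Dict Int Bool) (tem alive : List (List (String × Int))),
    pvRelState rel dead alive →
    (L.foldl (bodyB rel (pvBuildIdx rel)) (dead, tem)).2 = (L.foldl pvStep (alive, tem)).2 ∧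
    pvRelState rel (L.foldl (bodyB rel (pvBuildIdx rel)) (dead, tem)).1
      (L.foldl pvStep (alive, tem)).1 := by
  intro L
  induction L with
  | nil => intro dead tem alive h; exact ⟨rfl, h⟩
  | cons i t ih =>
    intro dead tem alive h
    obtain ⟨he2, hrs⟩ := bodyB_eq (i := i) (tem := tem) h
    rw [List.foldl_cons, List.foldl_cons]
    have hpair : bodyB rel (pvBuildIdx rel) (dead, tem) i
        = ((bodyB rel (pvBuildIdx rel) (dead, tem) i).1, (pvStep (alive, tem) i).2) := by
      rw [← he2]
    rw [hpair]
    have := ih (bodyB rel (pvBuildIdx rel) (dead, tem) i).1 (pvStep (alive, tem) i).2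
      (pvStep (alive, tem) i).1 hrs
    simpa using this

theorem pvRelState_init (rel : List (List (String × Int))) :
    pvRelState rel PySem.Dict.empty rel := by
  unfold pvRelState
  rw [List.filter_congr (q := fun _ => true)
    (by intro p hp; simp [PySem.Dict.contains_empty]), List.filter_true, pvEnum_snd]

-- ===== VERDICT (by name: the statement is the Claim_ definition above) =====
theorem findrel_spec : Claim_equal_findrel := by
  unfold Claim_equal_findrel
  intro st time rel _ hpre
  unfold Spec_findrel
  obtain ⟨_, hnodup, _⟩ := hpre
  cases hL : pvLookup st time with
  | none => simp only [findrel, findrel_alt, hL]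
  | some L =>
    simp only [findrel, findrel_alt, hL]
    obtain ⟨ds', hA⟩ := foldA L rel [] [] ⟨hnodup, by simp⟩
    rw [hA]
    obtain ⟨hB2, hB1⟩ := foldB rel L PySem.Dict.empty [] rel (pvRelState_init rel)
    unfold pvRelState at hB1
    rw [hB2, ← hB1]
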